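-- pv_equiv track=rewrite | github.com/Gapryong-Kim/Cryptiq1 | CryptiQ/cipher_tools/encoders.py | amsco_decode
-- ===== SOURCE A (Python) =====
-- def amsco_decode(cipher, key):
--     ncols = len(key)
--     key_order = sorted(range(ncols), key=lambda k: key[k])
--     rows = len(cipher) // ncols
--     col_length = [rows] * ncols
--     extra = len(cipher) % ncols
--     for i in range(extra):
--         col_length[key_order[i]] += 1
--     cols, index = [''] * ncols, 0
--     for k in key_order:
--         cols[k] = cipher[index:index + col_length[k]]
--         index += col_length[k]
--     plaintext = ''
--     for i in range(rows + 1):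
--         for c in range(ncols):
--             if i < len(cols[c]):
--                 plaintext += cols[c][i]
--     return plaintext
-- ===== SOURCE B (Python) =====
-- def amsco_decode(cipher, key):
--     ncols = len(key)
--     key_order = sorted(range(ncols), key=lambda k: key[k])
--     rows, extra = divmod(len(cipher), ncols)
--     is_long = [False] * ncols
--     for k in key_order[:extra]:
--         is_long[k] = True
--     long_before = [0] * ncols
--     acc = 0
--     for c in range(ncols):
--         long_before[c] = acc
--         acc += is_long[c]
--     out = [''] * len(cipher)
--     pos = 0
--     for rank, k in enumerate(key_order):
--         h = rows + 1 if rank < extra else rows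
--         for r in range(h):
--             t = r * ncols + k if r < rows else rows * ncols + long_before[k]
--             out[t] = cipher[pos]
--             pos += 1
--     return ''.join(out)
-- ===== Notes on version B (the rewrite author's own statement) =====
-- stated objective: alternative
-- what changed: B inverts the cipher's permutation and SCATTERS: it never builds columns or reads row-major; it walks the ciphertext once in column order and writes each character directly to its plaintext position, computed in closed form (r*ncols+k for full rows, rows*ncols + #long-columns-before-k for the partial row, via a prefix-sum table), then joins the output array; A gathers by slicing column substrings and scanning rows with a membership guard.
import Mathlib
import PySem

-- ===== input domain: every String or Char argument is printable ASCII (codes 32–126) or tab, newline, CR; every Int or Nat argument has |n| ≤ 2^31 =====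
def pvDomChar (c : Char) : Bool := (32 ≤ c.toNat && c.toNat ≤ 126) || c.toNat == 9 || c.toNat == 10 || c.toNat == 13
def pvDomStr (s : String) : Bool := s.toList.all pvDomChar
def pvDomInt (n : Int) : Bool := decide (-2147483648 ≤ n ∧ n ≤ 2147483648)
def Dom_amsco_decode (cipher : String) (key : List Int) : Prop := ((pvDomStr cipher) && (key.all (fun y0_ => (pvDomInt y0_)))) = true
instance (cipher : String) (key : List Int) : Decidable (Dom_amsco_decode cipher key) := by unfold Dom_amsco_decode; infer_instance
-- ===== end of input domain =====

-- B inverts the transposition and scatters: it walks the ciphertext once in column order and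
-- writes each character straight to its closed-form plaintext position, instead of A's
-- slice-columns-then-gather-row-major; same return value.

-- ===== PORT A =====
-- every list index A uses is in range (indices come from range(ncols) / the guard i < len(cols[c])),
-- so pyGetD/pySetD coincide with Python's raising indexing here
def amsco_decode (cipher : String) (key : List Int) : String :=
  let s := cipher.toList
  let ncols : Int := key.length
  let key_order := PySem.List.sorted (PySem.List.pyRange 0 ncols 1)
      (fun k => PySem.List.pyGetD key k 0) false
  let rows := PySem.Int.floordiv (s.length : Int) ncols
  let extra := PySem.Int.mod (s.length : Int) ncols
  let col_length := (PySem.List.pyRange 0 extra 1).foldl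
      (fun cl i =>
        let k := PySem.List.pyGetD key_order i 0
        PySem.List.pySetD cl k (PySem.List.pyGetD cl k 0 + 1))
      (PySem.List.pyRepeat [rows] ncols)
  let st := key_order.foldl
      (fun st k =>
        let cl := PySem.List.pyGetD col_length k 0
        (PySem.List.pySetD st.1 k (PySem.List.slice s (some st.2) (some (st.2 + cl))), st.2 + cl))
      ((PySem.List.pyRepeat [([] : List Char)] ncols), (0 : Int))
  String.ofList ((PySem.List.pyRange 0 (rows + 1) 1).foldl
    (fun acc i => (PySem.List.pyRange 0 ncols 1).foldl
      (fun acc c =>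
        let col := PySem.List.pyGetD st.1 c []
        if i < (col.length : Int) then acc ++ [PySem.List.pyGetD col i ' '] else acc) acc) [])

-- ===== PORT B =====
-- out is Python's list of one-char strings (strings as List Char); ''.join = flatten;
-- `acc += is_long[c]` adds a bool to an int, ported as `+ if … then 1 else 0`;
-- every index B touches is in range, so pyGetD/pySetD coincide with Python's raising indexing
def amsco_decode_alt (cipher : String) (key : List Int) : String :=
  let s := cipher.toList
  let ncols : Int := key.length
  let key_order := PySem.List.sorted (PySem.List.pyRange 0 ncols 1)
      (fun k => PySem.List.pyGetD key k 0) false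
  let rows := PySem.Int.floordiv (s.length : Int) ncols
  let extra := PySem.Int.mod (s.length : Int) ncols
  let is_long := (PySem.List.slice key_order none (some extra)).foldl
      (fun il k => PySem.List.pySetD il k true)
      (PySem.List.pyRepeat [false] ncols)
  let lb := ((PySem.List.pyRange 0 ncols 1).foldl
      (fun st c =>
        (PySem.List.pySetD st.1 c st.2,
         st.2 + (if PySem.List.pyGetD is_long c false then 1 else 0)))
      (PySem.List.pyRepeat [(0 : Int)] ncols, (0 : Int))).1
  let out := ((PySem.List.enumerate key_order 0).foldl
      (fun st rk =>
        let h := if rk.1 < extra then rows + 1 else rows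
        (PySem.List.pyRange 0 h 1).foldl
          (fun st r =>
            let t := if r < rows then r * ncols + rk.2
                     else rows * ncols + PySem.List.pyGetD lb rk.2 0
            (PySem.List.pySetD st.1 t [PySem.List.pyGetD s st.2 ' '], st.2 + 1))
          st)
      (PySem.List.pyRepeat [([] : List Char)] (s.length : Int), (0 : Int))).1
  String.ofList out.flatten

-- ===== PRECONDITION & SPEC =====
-- Pre_ excludes only key = [], on which A raises ZeroDivisionError (len(cipher) // 0)
def Pre_amsco_decode (cipher : String) (key : List Int) : Prop := key ≠ []
instance (cipher : String) (key : List Int) : Decidable (Pre_amsco_decode cipher key) := by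
  unfold Pre_amsco_decode; infer_instance
def pvWitness_amsco_decode : String × List Int := ("etCdoeddcoe", [3, 1, 2])
def Spec_amsco_decode (cipher : String) (key : List Int) (out : String) : Prop := out = amsco_decode_alt cipher key
instance (cipher : String) (key : List Int) (out : String) : Decidable (Spec_amsco_decode cipher key out) := by unfold Spec_amsco_decode; infer_instance

-- ===== CLAIM (what is proved, stated in full; the proofs are below) =====
def Claim_equal_amsco_decode : Prop := ∀ (cipher : String) (key : List Int), Dom_amsco_decode cipher key → Pre_amsco_decode cipher key → Spec_amsco_decode cipher key (amsco_decode cipher key)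

-- ===== LEMMAS AND PROOFS =====

theorem pv_getD_set {α : Type} (l : List α) (i j : Nat) (v d : α) :
    (l.set i v).getD j d = if j = i ∧ j < l.length then v else l.getD j d := by
  by_cases hij : i = j
  · subst hij
    by_cases hlen : i < l.length
    · simp [List.getD, hlen]
    · simp [List.getD, hlen]
  · rw [if_neg (fun h => hij h.1.symm)]
    simp only [List.getD, List.getElem?_set, if_neg hij]

theorem pv_inc_len (t : List Int) (cl : List Int) :
    (t.foldl (fun cl k => PySem.List.pySetD cl k (PySem.List.pyGetD cl k 0 + 1)) cl).length = cl.length := by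
  induction t generalizing cl with
  | nil => rfl
  | cons k t ih => rw [List.foldl_cons, ih]; exact PySem.List.length_pySetD ..

theorem pv_inc_getD (t : List Int) (cl : List Int)
    (hr : ∀ k ∈ t, 0 ≤ k ∧ k < (cl.length : Int)) (j : Nat) :
    (t.foldl (fun cl k => PySem.List.pySetD cl k (PySem.List.pyGetD cl k 0 + 1)) cl).getD j 0
      = cl.getD j 0 + t.count (j : Int) := by
  induction t generalizing cl with
  | nil => simp
  | cons k t ih =>
    obtain ⟨hk0, hkl⟩ := hr k (by simp)
    rw [List.foldl_cons, ih _ (fun x hx => by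
          have := hr x (List.mem_cons_of_mem _ hx)
          simpa [PySem.List.length_pySetD] using this)]
    rw [PySem.List.pySetD_of_nonneg _ _ hk0, PySem.List.pyGetD_eq_getElem _ _ hk0 hkl,
        pv_getD_set, List.count_cons]
    by_cases hj : j = k.toNat
    · subst hj
      have hl : k.toNat < cl.length := by omega
      rw [if_pos ⟨rfl, hl⟩, List.getD_eq_getElem _ _ hl]
      have : ((k.toNat : Nat) : Int) = k := by omega
      simp [this]
      ring
    · rw [if_neg (by tauto)]
      have h2 : ¬ (k = (j : Int)) := by omega
      simp [h2]

theorem pv_count_take {l : List Int} (hnd : l.Nodup) (r m : Nat) (hr : r < l.length) :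
    (l.take m).count l[r] = if r < m then 1 else 0 := by
  have hsub : (l.take m).Sublist l := List.take_sublist m l
  have hndt : (l.take m).Nodup := hnd.sublist hsub
  by_cases hm : r < m
  · have hrt : r < (l.take m).length := by simp; omega
    have hmem : l[r] ∈ l.take m := by
      have := List.getElem_mem hrt
      rwa [List.getElem_take] at this
    rw [if_pos hm]
    exact List.count_eq_one_of_mem hndt hmem
  · rw [if_neg hm, List.count_eq_zero]
    intro hmem
    obtain ⟨q, hq, hql⟩ := List.getElem_of_mem hmem
    rw [List.getElem_take] at hql
    have hq' : q < l.length := by simp at hq; omega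
    have : q = r := by
      have := (hnd.getElem_inj_iff (hi := hq') (hj := hr)).mp (by simpa using hql)
      exact this
    simp at hq; omega

theorem pv_map_range_take (ord : List Int) (e : Int) (hl : e ≤ (ord.length : Int)) :
    (PySem.List.pyRange 0 e).map (fun i => PySem.List.pyGetD ord i 0) = ord.take e.toNat := by
  apply List.ext_getElem
  · simp [PySem.List.length_pyRange_one]; omega
  · intro i h1 h2
    simp only [List.getElem_map, PySem.List.getElem_pyRange_one, List.getElem_take]
    have hlen : i < ord.length := by
      simp [PySem.List.length_pyRange_one] at h1; omega
    have hc : ((0:Int) + (i:Int)) = ((i : Nat) : Int) := by omega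
    rw [hc, PySem.List.pyGetD_natCast, List.getD_eq_getElem _ _ hlen]

theorem pv_sum_heights (N rows extra : Int) (h0 : 0 ≤ extra) (h1 : extra ≤ N) :
    ((PySem.List.pyRange 0 N).map (fun r => if r < extra then rows + 1 else rows)).sum
      = N * rows + extra := by
  rw [PySem.List.pyRange_one_append 0 extra N h0 h1, List.map_append, List.sum_append]
  have e1 : (PySem.List.pyRange 0 extra).map (fun r => if r < extra then rows + 1 else rows)
      = (PySem.List.pyRange 0 extra).map (fun _ => rows + 1) := by
    apply List.map_congr_left
    intro x hx
    rw [if_pos (PySem.List.mem_pyRange_one.mp hx).2]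
  have e2 : (PySem.List.pyRange extra N).map (fun r => if r < extra then rows + 1 else rows)
      = (PySem.List.pyRange extra N).map (fun _ => rows) := by
    apply List.map_congr_left
    intro x hx
    rw [if_neg (by have := (PySem.List.mem_pyRange_one.mp hx).1; omega)]
  rw [e1, e2, PySem.List.sum_map_const_int, PySem.List.sum_map_const_int,
    PySem.List.length_pyRange_one, PySem.List.length_pyRange_one]
  have c1 : (((extra - 0).toNat : Int)) = extra := by omega
  have c2 : (((N - extra).toNat : Int)) = N - extra := by omega
  rw [c1, c2]
  ring

theorem pv_getD_pySetD {α : Type} (l : List α) {k : Int} (v d : α) (hk : 0 ≤ k) (j : Nat) :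
    (PySem.List.pySetD l k v).getD j d = if j = k.toNat ∧ j < l.length then v else l.getD j d := by
  rw [PySem.List.pySetD_of_nonneg _ _ hk]; exact pv_getD_set l k.toNat j v d

-- A's column-building step (over enumerate key_order: ranks paired with columns)
def pvStepA (s : List Char) (H : Int → Int) :
    (List (List Char) × Int) → (Int × Int) → (List (List Char) × Int) := fun st p =>
  (PySem.List.pySetD st.1 p.2 (PySem.List.slice s (some st.2) (some (st.2 + H p.1))), st.2 + H p.1)

-- B's elementary write: put cipher char #w.2 at plaintext slot #w.1
def pvWrite (s : List Char) : List (List Char) → (Int × Int) → List (List Char) := fun o w =>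
  PySem.List.pySetD o w.1 [PySem.List.pyGetD s w.2 ' ']

-- the flat (target, source) write list of B's scatter loop
def pvW (H : Int → Int) (tg : Int → Int → Int) : List (Int × Int) → Int → List (Int × Int)
  | [], _ => []
  | p :: tl, pos =>
      ((PySem.List.pyRange 0 (H p.1) 1).map (fun r => (tg r p.2, pos + r)))
        ++ pvW H tg tl (pos + H p.1)

theorem pv_untouchedA (s : List Char) (H : Int → Int) (l : List (Int × Int))
    (cols0 : List (List Char)) (pos0 : Int) (j : Nat)
    (h : ∀ p ∈ l, 0 ≤ p.2 ∧ p.2.toNat ≠ j) :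
    ((l.foldl (pvStepA s H) (cols0, pos0)).1).getD j [] = cols0.getD j [] := by
  induction l generalizing cols0 pos0 with
  | nil => rfl
  | cons p tl ih =>
    obtain ⟨hp0, hpj⟩ := h p (List.mem_cons_self ..)
    rw [List.foldl_cons, ih _ _ (fun q hq => h q (List.mem_cons_of_mem _ hq))]
    show (PySem.List.pySetD cols0 p.2 _).getD j [] = _
    rw [pv_getD_pySetD _ _ _ hp0, if_neg (fun hc => hpj hc.1.symm)]

theorem pv_colsA (s : List Char) (H : Int → Int) (l : List (Int × Int))
    (cols0 : List (List Char)) (pos0 : Int)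
    (hnd : (l.map (fun p => p.2)).Nodup)
    (hrng : ∀ p ∈ l, 0 ≤ p.2 ∧ p.2.toNat < cols0.length)
    (q : Nat) (hq : q < l.length) :
    ((l.foldl (pvStepA s H) (cols0, pos0)).1).getD (l[q]'hq).2.toNat []
      = PySem.List.slice s (some (pos0 + ((l.take q).map (fun p => H p.1)).sum))
          (some (pos0 + ((l.take q).map (fun p => H p.1)).sum + H (l[q]'hq).1)) := by
  induction l generalizing cols0 pos0 q with
  | nil => simp at hq
  | cons p tl ih =>
    obtain ⟨hp0, hpl⟩ := hrng p (List.mem_cons_self ..)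
    rw [List.map_cons, List.nodup_cons] at hnd
    obtain ⟨hpnot, hndtl⟩ := hnd
    cases q with
    | zero =>
      simp only [List.getElem_cons_zero, List.take_zero, List.map_nil, List.sum_nil, add_zero,
        List.foldl_cons]
      rw [pv_untouchedA s H tl _ _ _ (by
        intro r hr
        obtain ⟨hr0, _⟩ := hrng r (List.mem_cons_of_mem _ hr)
        refine ⟨hr0, fun hc => hpnot ?_⟩
        have : r.2 = p.2 := by omega
        rw [← this]
        exact List.mem_map.mpr ⟨r, hr, rfl⟩)]
      show (PySem.List.pySetD cols0 p.2 _).getD p.2.toNat [] = _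
      rw [pv_getD_pySetD _ _ _ hp0, if_pos ⟨rfl, hpl⟩]
    | succ q' =>
      have hq' : q' < tl.length := by simpa using hq
      rw [List.foldl_cons]
      have := ih (PySem.List.pySetD cols0 p.2
          (PySem.List.slice s (some pos0) (some (pos0 + H p.1)))) (pos0 + H p.1) hndtl
        (fun r hr => by
          have := hrng r (List.mem_cons_of_mem _ hr)
          simpa [PySem.List.length_pySetD] using this) q' hq'
      simp only [List.getElem_cons_succ, List.take_succ_cons, List.map_cons, List.sum_cons]
      have hstep : pvStepA s H (cols0, pos0) p
          = (PySem.List.pySetD cols0 p.2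
              (PySem.List.slice s (some pos0) (some (pos0 + H p.1))), pos0 + H p.1) := rfl
      rw [hstep, this]
      have e1 : pos0 + H p.1 + ((tl.take q').map (fun p => H p.1)).sum
          = pos0 + (H p.1 + ((tl.take q').map (fun p => H p.1)).sum) := by ring
      rw [e1]

-- B's inner loop (write h chars down one column) flattened to explicit positions
theorem pv_inner (s : List Char) (tg : Int → Int) (o : List (List Char)) (p : Int) (h : Nat) :
    (PySem.List.pyRange 0 (h : Int) 1).foldl
      (fun st r => (PySem.List.pySetD st.1 (tg r) [PySem.List.pyGetD s st.2 ' '], st.2 + 1)) (o, p)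
    = ((PySem.List.pyRange 0 (h : Int) 1).foldl
        (fun o' r => PySem.List.pySetD o' (tg r) [PySem.List.pyGetD s (p + r) ' ']) o, p + h) := by
  induction h generalizing o p with
  | zero => simp [PySem.List.pyRange_one_eq_nil]
  | succ n ih =>
    have hc : ((n + 1 : Nat) : Int) = (n : Int) + 1 := by push_cast; ring
    rw [hc, PySem.List.pyRange_one_succ_right (by positivity : (0:Int) ≤ (n:Int)),
      List.foldl_append, List.foldl_append, ih]
    simp only [List.foldl_cons, List.foldl_nil]
    simp only [Prod.mk.injEq]
    refine ⟨trivial, by ring⟩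

theorem pv_outerB (s : List Char) (rows N : Int) (extra : Int) (lb : List Int)
    (l : List (Int × Int)) (o : List (List Char)) (pos : Int)
    (hH : ∀ p ∈ l, 0 ≤ (if p.1 < extra then rows + 1 else rows)) :
    l.foldl (fun st rk =>
        (PySem.List.pyRange 0 (if rk.1 < extra then rows + 1 else rows) 1).foldl
          (fun st r =>
            (PySem.List.pySetD st.1
              (if r < rows then r * N + rk.2 else rows * N + PySem.List.pyGetD lb rk.2 0)
              [PySem.List.pyGetD s st.2 ' '], st.2 + 1))
          st) (o, pos)
    = ((pvW (fun m => if m < extra then rows + 1 else rows)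
          (fun r c => if r < rows then r * N + c else rows * N + PySem.List.pyGetD lb c 0)
          l pos).foldl (pvWrite s) o,
       pos + (l.map (fun p => if p.1 < extra then rows + 1 else rows)).sum) := by
  induction l generalizing o pos with
  | nil => simp [pvW]
  | cons p tl ih =>
    have hp := hH p (List.mem_cons_self ..)
    have hcast : (if p.1 < extra then rows + 1 else rows)
        = (((if p.1 < extra then rows + 1 else rows)).toNat : Int) := by omega
    rw [List.foldl_cons]
    show tl.foldl _ (List.foldl
        (fun (st : List (List Char) × Int) (r : Int) =>
          (PySem.List.pySetD st.1
            (if r < rows then r * N + p.2 else rows * N + PySem.List.pyGetD lb p.2 0)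
            [PySem.List.pyGetD s st.2 ' '], st.2 + 1))
        (o, pos) (PySem.List.pyRange 0 (if p.1 < extra then rows + 1 else rows) 1)) = _
    have hstep := pv_inner s
      (fun r => if r < rows then r * N + p.2 else rows * N + PySem.List.pyGetD lb p.2 0)
      o pos ((if p.1 < extra then rows + 1 else rows)).toNat
    rw [hcast, hstep, ih _ _ (fun q hq => hH q (List.mem_cons_of_mem _ hq))]
    simp only [pvW, pvWrite, List.foldl_append, List.foldl_map, List.map_cons, List.sum_cons,
      Prod.mk.injEq]
    constructor
    · rw [← hcast]
    · rw [← hcast]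
      ring

theorem pv_mem_pvW (H : Int → Int) (tg : Int → Int → Int) (l : List (Int × Int)) (pos : Int)
    (w : Int × Int) :
    w ∈ pvW H tg l pos ↔ ∃ (q : Nat) (hq : q < l.length) (r : Int),
      0 ≤ r ∧ r < H ((l[q]'hq).1) ∧
      w = (tg r (l[q]'hq).2, pos + ((l.take q).map (fun p => H p.1)).sum + r) := by
  induction l generalizing pos with
  | nil => simp [pvW]
  | cons p tl ih =>
    simp only [pvW, List.mem_append, List.mem_map, ih]
    constructor
    · rintro (⟨r, hr, rfl⟩ | ⟨q, hq, r, hr0, hrH, rfl⟩)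
      · obtain ⟨h0, h1⟩ := PySem.List.mem_pyRange_one.mp hr
        exact ⟨0, by simp, r, h0, h1, by simp⟩
      · refine ⟨q + 1, by simpa using hq, r, hr0, by simpa using hrH, ?_⟩
        simp only [List.getElem_cons_succ, List.take_succ_cons, List.map_cons, List.sum_cons,
          Prod.mk.injEq]
        exact ⟨trivial, by ring⟩
    · rintro ⟨q, hq, r, hr0, hrH, rfl⟩
      cases q with
      | zero =>
        left
        exact ⟨r, PySem.List.mem_pyRange_one.mpr ⟨hr0, by simpa using hrH⟩, by simp⟩
      | succ q' =>
        right
        refine ⟨q', by simpa using hq, r, hr0, by simpa using hrH, ?_⟩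
        simp only [List.getElem_cons_succ, List.take_succ_cons, List.map_cons, List.sum_cons,
          Prod.mk.injEq]
        exact ⟨trivial, by ring⟩

theorem pv_shift_pyRange (a h : Int) :
    (PySem.List.pyRange 0 h 1).map (fun r => a + r) = PySem.List.pyRange a (a + h) 1 := by
  rw [PySem.List.pyRange_one, PySem.List.pyRange_one, List.map_map]
  have : (a + h - a).toNat = (h - 0).toNat := by omega
  rw [this]
  apply List.map_congr_left
  intro x _
  simp

theorem pv_map_snd_pvW (H : Int → Int) (tg : Int → Int → Int) (l : List (Int × Int)) (pos : Int)
    (hH : ∀ p ∈ l, 0 ≤ H p.1) :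
    (pvW H tg l pos).map Prod.snd
      = PySem.List.pyRange pos (pos + (l.map (fun p => H p.1)).sum) 1 := by
  induction l generalizing pos with
  | nil => simp [pvW, PySem.List.pyRange_one_eq_nil]
  | cons p tl ih =>
    have hp := hH p (List.mem_cons_self ..)
    have hsum : 0 ≤ (tl.map (fun p => H p.1)).sum :=
      List.sum_nonneg (by
        intro x hx
        obtain ⟨q, hq, rfl⟩ := List.mem_map.mp hx
        exact hH q (List.mem_cons_of_mem _ hq))
    simp only [pvW, List.map_append, List.map_map]
    rw [ih _ (fun q hq => hH q (List.mem_cons_of_mem _ hq))]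
    have : ((fun w : Int × Int => w.2) ∘ fun r => (tg r p.2, pos + r)) = fun r => pos + r := rfl
    rw [show (Prod.snd ∘ fun r => (tg r p.2, pos + r)) = fun r => pos + r from rfl,
      pv_shift_pyRange]
    have e : pos + H p.1 + (tl.map (fun p => H p.1)).sum
        = pos + (H p.1 + (tl.map (fun p => H p.1)).sum) := by ring
    rw [e, ← PySem.List.pyRange_one_append pos (pos + H p.1)
      (pos + (H p.1 + (tl.map (fun p => H p.1)).sum)) (by omega) (by omega)]
    simp only [List.map_cons, List.sum_cons]

-- fold of writes whose targets are exactly k, k+1, … in order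
theorem pv_assemble (s : List Char) (W : List (Int × Int)) (o : List (List Char)) (k : Nat)
    (ht : W.map Prod.fst = PySem.List.pyRange (k : Int) ((k : Int) + W.length) 1)
    (hlen : k + W.length ≤ o.length) :
    W.foldl (pvWrite s) o
      = o.take k ++ W.map (fun w => [PySem.List.pyGetD s w.2 ' ']) ++ o.drop (k + W.length) := by
  induction W generalizing o k with
  | nil => simp
  | cons w tl ih =>
    have hkk : (k : Int) < (k : Int) + (w :: tl).length := by push_cast [List.length_cons]; omega
    rw [PySem.List.pyRange_one_cons hkk] at ht
    simp only [List.map_cons, List.cons.injEq] at ht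
    obtain ⟨hw1, htl⟩ := ht
    have hklt : k < o.length := by simp at hlen; omega
    rw [List.foldl_cons]
    have hset : pvWrite s o w = o.set k [PySem.List.pyGetD s w.2 ' '] := by
      unfold pvWrite
      rw [hw1, PySem.List.pySetD_natCast]
    rw [hset]
    have htl' : tl.map Prod.fst
        = PySem.List.pyRange ((k + 1 : Nat) : Int) (((k + 1 : Nat) : Int) + tl.length) 1 := by
      rw [htl]
      congr 1
      push_cast [List.length_cons]
      ring
    rw [ih _ (k + 1) htl' (by simp at hlen ⊢; omega)]
    have e1 : (o.set k [PySem.List.pyGetD s w.2 ' ']).take (k + 1)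
        = o.take k ++ [[PySem.List.pyGetD s w.2 ' ']] := by
      apply List.ext_getElem
      · simp [List.length_set, List.length_take]; omega
      · intro i h1 h2
        simp only [List.getElem_take, List.getElem_set]
        by_cases hik : k = i
        · subst hik
          rw [if_pos rfl]
          rw [List.getElem_append_right (by simp [List.length_take])]
          simp [List.length_take]
        · rw [if_neg hik, List.getElem_append_left (by
            simp only [List.length_take]
            simp only [List.length_take, List.length_set, Nat.lt_min] at h1
            omega)]
          simp [List.getElem_take]
    have e2 : (o.set k [PySem.List.pyGetD s w.2 ' ']).drop (k + 1 + tl.length)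
        = o.drop (k + (w :: tl).length) := by
      have : k + (w :: tl).length = k + 1 + tl.length := by simp; omega
      rw [this, List.drop_set_of_lt (by omega)]
    rw [e1, e2]
    simp [List.append_assoc]

theorem pv_flatten_singleton {α : Type} (l : List α) :
    (l.map (fun x => [x])).flatten = l := by
  induction l with
  | nil => rfl
  | cons x tl ih => simp [ih]

-- consecutive full blocks tile a range
theorem pv_blocks (N : Int) (R : Nat) (hN : 0 ≤ N) :
    (PySem.List.pyRange 0 (R : Int) 1).flatMap
        (fun i => PySem.List.pyRange (i * N) (i * N + N) 1)
      = PySem.List.pyRange 0 ((R : Int) * N) 1 := by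
  induction R with
  | zero => simp [PySem.List.pyRange_one_eq_nil]
  | succ n ih =>
    have hc : ((n + 1 : Nat) : Int) = (n : Int) + 1 := by push_cast; ring
    rw [hc, PySem.List.pyRange_one_succ_right (by positivity : (0:Int) ≤ (n:Int)),
      List.flatMap_append, ih]
    simp only [List.flatMap_cons, List.flatMap_nil, List.append_nil]
    have e : (n : Int) * N + N = ((n : Int) + 1) * N := by ring
    rw [e, ← PySem.List.pyRange_one_append 0 ((n : Int) * N) (((n : Int) + 1) * N)
      (by positivity) (by nlinarith)]

theorem pv_lenA (s : List Char) (H : Int → Int) (l : List (Int × Int))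
    (c0 : List (List Char)) (p0 : Int) :
    (l.foldl (pvStepA s H) (c0, p0)).1.length = c0.length := by
  induction l generalizing c0 p0 with
  | nil => rfl
  | cons p tl ih =>
    rw [List.foldl_cons]
    exact (ih _ _).trans (PySem.List.length_pySetD ..)

theorem pv_setTrue (t : List Int) (il0 : List Bool)
    (hr : ∀ k ∈ t, 0 ≤ k ∧ k < (il0.length : Int)) (j : Nat) :
    (t.foldl (fun il k => PySem.List.pySetD il k true) il0).getD j false
      = (il0.getD j false || decide ((j : Int) ∈ t)) := by
  induction t generalizing il0 with
  | nil => simp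
  | cons k tl ih =>
    obtain ⟨hk0, hkl⟩ := hr k (List.mem_cons_self ..)
    rw [List.foldl_cons, ih _ (fun x hx => by
      simpa [PySem.List.length_pySetD] using hr x (List.mem_cons_of_mem _ hx))]
    rw [pv_getD_pySetD _ _ _ hk0]
    by_cases hj : j = k.toNat ∧ j < il0.length
    · rw [if_pos hj]
      have hjk : (j : Int) = k := by omega
      simp [List.mem_cons, hjk]
    · rw [if_neg hj]
      have hjk : ¬ ((j : Int) = k) := by
        intro hc
        exact hj ⟨by omega, by omega⟩
      simp [List.mem_cons, hjk]

theorem pv_lb (il : List Bool) (k : Nat) (a : Int) (arr0 : List Int) (acc0 : Int)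
    (ha : 0 ≤ a) (hb : a + (k : Int) ≤ (arr0.length : Int)) (j : Nat) (hj : j < arr0.length) :
    ((PySem.List.pyRange a (a + (k : Int)) 1).foldl
        (fun st c => (PySem.List.pySetD st.1 c st.2,
          st.2 + (if PySem.List.pyGetD il c false then (1 : Int) else 0))) (arr0, acc0)).1.getD j 0
      = if a ≤ (j : Int) ∧ (j : Int) < a + (k : Int) then
          acc0 + ((PySem.List.pyRange a (j : Int) 1).map
            (fun c => if PySem.List.pyGetD il c false then (1 : Int) else 0)).sum
        else arr0.getD j 0 := by
  induction k generalizing a arr0 acc0 with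
  | zero =>
    rw [show a + ((0 : Nat) : Int) = a by omega, PySem.List.pyRange_one_eq_nil (le_refl a)]
    rw [if_neg (by omega)]
    rfl
  | succ m ih =>
    have hlt : a < a + ((m + 1 : Nat) : Int) := by push_cast; omega
    rw [PySem.List.pyRange_one_cons hlt, List.foldl_cons]
    show (List.foldl _ (PySem.List.pySetD arr0 a acc0,
        acc0 + (if PySem.List.pyGetD il a false then (1 : Int) else 0))
        (PySem.List.pyRange (a + 1) (a + ((m + 1 : Nat) : Int)))).1.getD j 0 = _
    have he : a + ((m + 1 : Nat) : Int) = (a + 1) + ((m : Nat) : Int) := by push_cast; ring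
    rw [he, ih (a + 1) (PySem.List.pySetD arr0 a acc0)
      (acc0 + (if PySem.List.pyGetD il a false then (1 : Int) else 0))
      (by omega)
      (by rw [PySem.List.length_pySetD]; push_cast at hb ⊢; omega)
      (by rw [PySem.List.length_pySetD]; exact hj)]
    by_cases h1 : (a + 1) ≤ (j : Int) ∧ (j : Int) < a + 1 + ((m : Nat) : Int)
    · have hcond : a ≤ (j : Int) ∧ (j : Int) < a + 1 + ((m : Nat) : Int) := by omega
      rw [if_pos h1, if_pos hcond,
        PySem.List.pyRange_one_cons (show a < (j : Int) by omega), List.map_cons, List.sum_cons]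
      ring
    · rw [if_neg h1, pv_getD_pySetD _ _ _ ha]
      by_cases h2 : j = a.toNat ∧ j < arr0.length
      · have hcond : a ≤ (j : Int) ∧ (j : Int) < a + 1 + ((m : Nat) : Int) := by omega
        rw [if_pos h2, if_pos hcond]
        rw [show ((j : Nat) : Int) = a by omega, PySem.List.pyRange_one_eq_nil (le_refl a)]
        simp
      · rw [if_neg h2]
        have hja : ¬ (j = a.toNat) := fun hc => h2 ⟨hc, hj⟩
        have hcond : ¬ (a ≤ (j : Int) ∧ (j : Int) < a + 1 + ((m : Nat) : Int)) := by omega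
        rw [if_neg hcond]

theorem pv_pyRange_take (a b : Int) (m : Nat) (h1 : a + (m : Int) ≤ b) :
    (PySem.List.pyRange a b 1).take m = PySem.List.pyRange a (a + (m : Int)) 1 := by
  rw [PySem.List.pyRange_one_append a (a + (m : Int)) b (by omega) h1]
  exact List.take_left' (by rw [PySem.List.length_pyRange_one]; omega)

theorem pv_mem_take_iff {ord : List Int} (hnd : ord.Nodup) (e : Nat) (c : Int) (hc : c ∈ ord) :
    (c ∈ ord.take e ↔ List.idxOf c ord < e) := by
  constructor
  · intro h
    obtain ⟨j, hj, hje⟩ := List.getElem_of_mem h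
    rw [List.getElem_take] at hje
    have hjl : j < ord.length := by
      simp [List.length_take] at hj; omega
    have : List.idxOf c ord = j := by
      rw [← hje]
      exact hnd.idxOf_getElem j hjl
    rw [this]
    simp [List.length_take] at hj; omega
  · intro h
    have hlt : List.idxOf c ord < ord.length := List.idxOf_lt_length_iff.mpr hc
    have hlt2 : List.idxOf c ord < (ord.take e).length := by
      simp [List.length_take]; omega
    have : (ord.take e)[List.idxOf c ord]'hlt2 = c := by
      rw [List.getElem_take]
      exact List.getElem_idxOf hlt
    rw [← this]
    exact List.getElem_mem hlt2

theorem pv_filter_nodup_length {R L : List Int} (hR : R.Nodup) (hL : L.Nodup)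
    (hsub : ∀ x ∈ L, x ∈ R) :
    (R.filter (fun x => decide (x ∈ L))).length = L.length := by
  have h1 : (R.filter (fun x => decide (x ∈ L))).Nodup := hR.filter _
  have hperm : (R.filter (fun x => decide (x ∈ L))).Perm L := by
    rw [List.perm_ext_iff_of_nodup h1 hL]
    intro a
    simp only [List.mem_filter, decide_eq_true_eq]
    exact ⟨fun h => h.2, fun h => ⟨hsub a h, h⟩⟩
  exact hperm.length_eq

theorem pv_setTrue_len (t : List Int) (il0 : List Bool) :
    (t.foldl (fun il k => PySem.List.pySetD il k true) il0).length = il0.length := by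
  induction t generalizing il0 with
  | nil => rfl
  | cons k tl ih => rw [List.foldl_cons, ih]; exact PySem.List.length_pySetD ..

theorem pv_lb_len (il : List Bool) (t : List Int) (arr0 : List Int) (acc0 : Int) :
    ((t.foldl (fun st c => (PySem.List.pySetD st.1 c st.2,
        st.2 + (if PySem.List.pyGetD il c false then (1 : Int) else 0))) (arr0, acc0)).1).length
      = arr0.length := by
  induction t generalizing arr0 acc0 with
  | nil => rfl
  | cons k tl ih =>
    rw [List.foldl_cons]
    exact (ih _ _).trans (PySem.List.length_pySetD ..)

set_option maxHeartbeats 1600000 in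
theorem pv_main (cipher : String) (key : List Int) (hk : key ≠ []) :
    amsco_decode cipher key = amsco_decode_alt cipher key := by
  have hN : 0 < (key.length : Int) := by
    have := List.length_pos_iff.mpr hk; omega
  simp only [amsco_decode, amsco_decode_alt]
  rw [PySem.List.pyRepeat_singleton, PySem.List.pyRepeat_singleton,
    PySem.List.pyRepeat_singleton, PySem.List.pyRepeat_singleton, PySem.List.pyRepeat_singleton]
  set s := cipher.toList with hs
  set N : Int := (key.length : Int) with hNdef
  set ord := PySem.List.sorted (PySem.List.pyRange 0 N)
    (fun k => PySem.List.pyGetD key k 0) false with hord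
  set rows := PySem.Int.floordiv (s.length : Int) N with hrows
  set extra := PySem.Int.mod (s.length : Int) N with hextra
  have hNnat : N.toNat = key.length := by omega
  have hsnat : ((s.length : Int)).toNat = s.length := by omega
  rw [hNnat, hsnat]
  -- basic facts
  have hordperm : ord.Perm (PySem.List.pyRange 0 N) := PySem.List.sorted_perm ..
  have hordlen : ord.length = key.length := by
    rw [hordperm.length_eq, PySem.List.length_pyRange_one]; omega
  have hordnd : ord.Nodup := (hordperm.nodup_iff).mpr (PySem.List.nodup_pyRange_one ..)
  have hordmem : ∀ k ∈ ord, 0 ≤ k ∧ k < N := by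
    intro k hkm
    exact PySem.List.mem_pyRange_one.mp (hordperm.mem_iff.mp hkm)
  have hrows0 : 0 ≤ rows := by
    rw [hrows, PySem.Int.floordiv_eq_ediv_of_pos hN]
    exact Int.ediv_nonneg (by positivity) (by omega)
  have hext0 : 0 ≤ extra := PySem.Int.mod_nonneg _ hN
  have hextN : extra < N := PySem.Int.mod_lt _ hN
  have hLen : rows * N + extra = (s.length : Int) := PySem.Int.floordiv_mul_add_mod ..
  set HfI : Int → Int := fun m => if m < extra then rows + 1 else rows with hHfI
  have hHf0 : ∀ r : Int, 0 ≤ HfI r := by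
    intro r; rw [hHfI]; dsimp only; split_ifs <;> omega
  have hHfle : ∀ r : Int, HfI r ≤ rows + 1 := by
    intro r; rw [hHfI]; dsimp only; split_ifs <;> omega
  have hHfge : ∀ r : Int, rows ≤ HfI r := by
    intro r; rw [hHfI]; dsimp only; split_ifs <;> omega
  -- ===== A side: the col_length array =====
  set cl := (PySem.List.pyRange 0 extra).foldl
      (fun cl i => PySem.List.pySetD cl (PySem.List.pyGetD ord i 0)
        (PySem.List.pyGetD cl (PySem.List.pyGetD ord i 0) 0 + 1))
      (List.replicate key.length rows) with hcl
  have hcl2 : cl = (ord.take extra.toNat).foldl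
      (fun cl k => PySem.List.pySetD cl k (PySem.List.pyGetD cl k 0 + 1))
      (List.replicate key.length rows) := by
    rw [hcl, ← pv_map_range_take ord extra (by omega), List.foldl_map]
  have hclval : ∀ (r : Nat) (hr : r < key.length),
      PySem.List.pyGetD cl (ord[r]'(by omega)) 0 = HfI (r : Int) := by
    intro r hr
    have hrl : r < ord.length := by omega
    obtain ⟨hk0, hkN⟩ := hordmem _ (List.getElem_mem hrl)
    have hclL : cl.length = key.length := by
      rw [hcl2, pv_inc_len, List.length_replicate]
    have hjlt : (ord[r]'hrl).toNat < cl.length := by omega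
    rw [PySem.List.pyGetD_eq_getElem _ _ hk0 (by omega),
      ← List.getD_eq_getElem cl 0 hjlt, hcl2,
      pv_inc_getD _ _ (by
        intro x hx
        obtain ⟨h1, h2⟩ := hordmem x (List.mem_of_mem_take hx)
        simp only [List.length_replicate]
        exact ⟨h1, by omega⟩),
      List.getD_replicate _ (by omega)]
    have hcast : (((ord[r]'hrl).toNat : Nat) : Int) = ord[r]'hrl := by omega
    rw [hcast, pv_count_take hordnd r extra.toNat hrl, hHfI]
    dsimp only
    by_cases hre : (r : Int) < extra
    · rw [if_pos (by omega), if_pos hre]; omega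
    · rw [if_neg (by omega), if_neg hre]; omega
  -- ===== A side: columns fold over enumerate =====
  have hstA : ord.foldl
      (fun st k => (PySem.List.pySetD st.1 k
          (PySem.List.slice s (some st.2) (some (st.2 + PySem.List.pyGetD cl k 0))),
        st.2 + PySem.List.pyGetD cl k 0))
      ((List.replicate key.length ([] : List Char)), (0 : Int)) =
      (PySem.List.enumerate ord 0).foldl (pvStepA s HfI)
        ((List.replicate key.length ([] : List Char)), (0 : Int)) := by
    conv_lhs => rw [← PySem.List.map_snd_enumerate ord 0, List.foldl_map]
    apply PySem.List.foldl_congr_mem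
    intro acc p hp
    obtain ⟨r, hrlt, rfl⟩ := (PySem.List.mem_enumerate_iff ..).mp hp
    simp only [pvStepA]
    rw [hclval r (by omega)]
    have h0r : HfI (0 + (r : Int)) = HfI (r : Int) := by norm_num
    rw [h0r]
  rw [hstA]
  set tA := (PySem.List.enumerate ord 0).foldl (pvStepA s HfI)
    ((List.replicate key.length ([] : List Char)), (0 : Int)) with htA
  have hlenA : tA.1.length = key.length := by
    rw [htA, pv_lenA, List.length_replicate]
  -- ===== prefix sums of column heights =====
  set SSf : Nat → Int := fun q => ((PySem.List.pyRange 0 (q : Int)).map HfI).sum with hSSf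
  have hSSnn : ∀ q : Nat, 0 ≤ SSf q := by
    intro q
    refine List.sum_nonneg ?_
    intro x hx
    obtain ⟨r, _, rfl⟩ := List.mem_map.mp hx
    exact hHf0 r
  have hSSstep : ∀ q : Nat, SSf (q + 1) = SSf q + HfI (q : Int) := by
    intro q
    rw [hSSf]
    dsimp only
    rw [show (((q + 1 : Nat)) : Int) = (q : Int) + 1 by push_cast; ring,
      PySem.List.pyRange_one_succ_right (by positivity : (0 : Int) ≤ (q : Int)),
      List.map_append, List.sum_append]
    simp
  have hSSle : ∀ (q1 q2 : Nat), q1 ≤ q2 → SSf q1 ≤ SSf q2 := by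
    intro q1 q2 h12
    rw [hSSf]
    dsimp only
    rw [PySem.List.pyRange_one_append 0 (q1 : Int) (q2 : Int) (by positivity) (by omega),
      List.map_append, List.sum_append]
    have : 0 ≤ ((PySem.List.pyRange (q1 : Int) (q2 : Int)).map HfI).sum := by
      refine List.sum_nonneg ?_
      intro x hx
      obtain ⟨r, _, rfl⟩ := List.mem_map.mp hx
      exact hHf0 r
    omega
  have hSSend : SSf key.length = (s.length : Int) := by
    rw [hSSf]
    dsimp only
    rw [← hNdef, hHfI]
    rw [pv_sum_heights N rows extra hext0 (le_of_lt hextN)]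
    linarith [hLen]
  have hSSb : ∀ q : Nat, q < key.length → SSf q + HfI (q : Int) ≤ (s.length : Int) := by
    intro q hq
    rw [← hSSstep q, ← hSSend]
    exact hSSle _ _ (by omega)
  have htake : ∀ q : Nat, q ≤ key.length →
      ((PySem.List.enumerate ord 0).take q).map (fun p => HfI p.1)
        = (PySem.List.pyRange 0 (q : Int)).map HfI := by
    intro q hq
    rw [List.map_take, show (fun p : Int × Int => HfI p.1) = HfI ∘ (fun p : Int × Int => p.1)
        from rfl, ← List.map_map, PySem.List.map_fst_enumerate, ← List.map_take,
      pv_pyRange_take 0 (0 + (ord.length : Int)) q (by omega)]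
    norm_num
  -- ===== A side: the columns are segments of s =====
  have hcolsA : ∀ (m : Nat) (hm : m < key.length),
      tA.1.getD ((ord[m]'(by omega)).toNat) []
        = (s.drop (SSf m).toNat).take (HfI (m : Int)).toNat := by
    intro m hm
    have hml : m < (PySem.List.enumerate ord 0).length := by
      rw [PySem.List.length_enumerate]; omega
    have hseg := pv_colsA s HfI (PySem.List.enumerate ord 0)
      (List.replicate key.length ([] : List Char)) 0
      (by rw [PySem.List.map_snd_enumerate]; exact hordnd)
      (by
        intro p hp
        obtain ⟨k, hk, rfl⟩ := (PySem.List.mem_enumerate_iff ..).mp hp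
        obtain ⟨h1, h2⟩ := hordmem _ (List.getElem_mem hk)
        simp only [List.length_replicate]
        exact ⟨h1, by omega⟩)
      m hml
    rw [PySem.List.getElem_enumerate] at hseg
    dsimp only at hseg
    rw [htake m (le_of_lt hm)] at hseg
    have e1 : ((PySem.List.pyRange 0 (m : Int)).map HfI).sum = SSf m := rfl
    have e2 : (0 : Int) + SSf m = SSf m := by ring
    have e3 : (0 : Int) + (m : Int) = (m : Int) := by ring
    rw [e1, e2, e3] at hseg
    rw [← htA] at hseg
    rw [hseg, PySem.List.slice_toNat s (hSSnn m)
      (by have := hSSnn m; have := hHf0 ((m : Int)); omega)]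
    congr 1
    have := hSSnn m
    have := hHf0 ((m : Int))
    omega
  have hRidx : ∀ (c : Int), (h0 : 0 ≤ c) → (hcN : c < N) →
      List.idxOf c ord < ord.length ∧ (ord[List.idxOf c ord]'(List.idxOf_lt_length_iff.mpr
        (hordperm.mem_iff.mpr (PySem.List.mem_pyRange_one.mpr (by omega)))) = c) := by
    intro c h0 hcN
    have hmem : c ∈ ord := hordperm.mem_iff.mpr (PySem.List.mem_pyRange_one.mpr (by omega))
    exact ⟨List.idxOf_lt_length_iff.mpr hmem, List.getElem_idxOf _⟩
  have hcol : ∀ c : Int, 0 ≤ c → c < N →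
      PySem.List.pyGetD tA.1 c []
        = (s.drop (SSf (List.idxOf c ord)).toNat).take (HfI ((List.idxOf c ord : Nat) : Int)).toNat := by
    intro c h0 hcN
    obtain ⟨hlt, hg⟩ := hRidx c h0 hcN
    have := hcolsA (List.idxOf c ord) (by omega)
    have hclen : c < (tA.1.length : Int) := by rw [hlenA]; omega
    rw [PySem.List.pyGetD_eq_getElem _ _ h0 hclen,
      ← List.getD_eq_getElem tA.1 [] (by rw [hlenA]; omega)]
    have hcn : c.toNat = (ord[List.idxOf c ord]'hlt).toNat := by rw [hg]
    rw [hcn]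
    exact this
  have hcollen : ∀ c : Int, 0 ≤ c → c < N →
      ((PySem.List.pyGetD tA.1 c []).length : Int) = HfI ((List.idxOf c ord : Nat) : Int) := by
    intro c h0 hcN
    rw [hcol c h0 hcN, List.length_take, List.length_drop]
    have h1 := hSSnn (List.idxOf c ord)
    have h2 := hHf0 ((List.idxOf c ord : Nat) : Int)
    have h3 := hSSb (List.idxOf c ord) (by
      have := (hRidx c h0 hcN).1; omega)
    omega
  -- ===== B side: is_long =====
  rw [PySem.List.slice_to ord hext0]
  set TK := ord.take extra.toNat with hTK
  have hTKnd : TK.Nodup := hordnd.sublist (List.take_sublist ..)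
  have hTKmem : ∀ x ∈ TK, 0 ≤ x ∧ x < N := fun x hx => hordmem x (List.mem_of_mem_take hx)
  set il := TK.foldl (fun il k => PySem.List.pySetD il k true)
    (List.replicate key.length false) with hil
  have hilval : ∀ c : Int, 0 ≤ c → c < N → PySem.List.pyGetD il c false = decide (c ∈ TK) := by
    intro c h0 hcN
    have hlen : il.length = key.length := by
      rw [hil, pv_setTrue_len, List.length_replicate]
    rw [PySem.List.pyGetD_eq_getElem _ _ h0 (by omega),
      ← List.getD_eq_getElem il false (by omega), hil,
      pv_setTrue _ _ (by
        intro k hkm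
        obtain ⟨h1, h2⟩ := hTKmem k hkm
        simp only [List.length_replicate]
        exact ⟨h1, by omega⟩)]
    rw [List.getD_replicate _ (by omega), Bool.false_or,
      show ((c.toNat : Nat) : Int) = c by omega]
  -- ===== B side: the prefix-count array lb =====
  set lbF : Int → Int := fun c =>
    (((PySem.List.pyRange 0 c).countP (fun x => decide (x ∈ TK))) : Int) with hlbF
  have hlbF0 : ∀ c : Int, 0 ≤ lbF c := by
    intro c; rw [hlbF]; positivity
  set lbarr := ((PySem.List.pyRange 0 N).foldl
      (fun st c => (PySem.List.pySetD st.1 c st.2,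
        st.2 + (if PySem.List.pyGetD il c false then (1 : Int) else 0)))
      (List.replicate key.length (0 : Int), (0 : Int))).1 with hlbarr
  have hlbval : ∀ c : Int, 0 ≤ c → c < N → PySem.List.pyGetD lbarr c 0 = lbF c := by
    intro c h0 hcN
    have hlen0 : lbarr.length = key.length := by
      rw [hlbarr, pv_lb_len, List.length_replicate]
    have hpl := pv_lb il key.length 0 (List.replicate key.length (0 : Int)) 0 (le_refl 0)
      (by simp) c.toNat (by simp; omega)
    rw [show (0 : Int) + (key.length : Int) = N by omega] at hpl
    rw [PySem.List.pyGetD_eq_getElem _ _ h0 (by omega),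
      ← List.getD_eq_getElem lbarr 0 (by omega), hlbarr, hpl]
    have hcond : (0 : Int) ≤ ((c.toNat : Nat) : Int) ∧ ((c.toNat : Nat) : Int) < N := by omega
    rw [if_pos hcond, show ((c.toNat : Nat) : Int) = c by omega]
    have hm2 : (PySem.List.pyRange 0 c).map
        (fun x => if PySem.List.pyGetD il x false then (1 : Int) else 0)
        = (PySem.List.pyRange 0 c).map
          (fun x => if (fun y => decide (y ∈ TK)) x then (1 : Int) else 0) := by
      apply List.map_congr_left
      intro x hx
      obtain ⟨hx0, hx1⟩ := PySem.List.mem_pyRange_one.mp hx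
      rw [hilval x hx0 (by omega)]
    rw [hm2, PySem.List.sum_map_ite_one_zero]
    rw [hlbF]
    dsimp only
    omega
  -- ===== B side: the scatter loop as a flat write list =====
  rw [pv_outerB s rows N extra lbarr (PySem.List.enumerate ord 0)
    (List.replicate s.length ([] : List Char)) 0 (fun p _ => hHf0 p.1)]
  rw [show (fun m : Int => if m < extra then rows + 1 else rows) = HfI from rfl]
  set tgt : Int → Int → Int := fun r c =>
    if r < rows then r * N + c else rows * N + PySem.List.pyGetD lbarr c 0 with htgt
  set WB := pvW HfI tgt (PySem.List.enumerate ord 0) 0 with hWB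
  -- ===== the row-major write list =====
  set RM := (PySem.List.pyRange 0 (rows + 1)).flatMap
    (fun i => ((PySem.List.pyRange 0 N).filter
        (fun c => decide (i < HfI ((List.idxOf c ord : Nat) : Int)))).map
      (fun c => ((if i < rows then i * N + c else rows * N + lbF c),
        SSf (List.idxOf c ord) + i))) with hRM
  have hWBmem : ∀ w : Int × Int, w ∈ WB ↔ ∃ (q : Nat), q < key.length ∧ ∃ (r : Int),
      0 ≤ r ∧ r < HfI (q : Int) ∧
      w = ((if r < rows then r * N + ord.getD q 0 else rows * N + lbF (ord.getD q 0)),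
        SSf q + r) := by
    intro w
    rw [hWB, pv_mem_pvW]
    constructor
    · rintro ⟨q, hq, r, hr0, hrH, rfl⟩
      have hq' : q < key.length := by
        rw [PySem.List.length_enumerate] at hq; omega
      have hqo : q < ord.length := by omega
      have hb := hordmem _ (List.getElem_mem hqo)
      rw [PySem.List.getElem_enumerate] at hrH ⊢
      dsimp only at hrH ⊢
      rw [show (0 : Int) + (q : Int) = (q : Int) by ring] at hrH
      refine ⟨q, hq', r, hr0, hrH, ?_⟩
      rw [htake q (le_of_lt hq')]
      have e1 : ((PySem.List.pyRange 0 (q : Int)).map HfI).sum = SSf q := rfl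
      rw [e1, htgt]
      dsimp only
      rw [List.getD_eq_getElem ord 0 hqo, hlbval _ hb.1 hb.2]
      simp only [Prod.mk.injEq]
      exact ⟨trivial, by ring⟩
    · rintro ⟨q, hq', r, hr0, hrH, rfl⟩
      have hq : q < (PySem.List.enumerate ord 0).length := by
        rw [PySem.List.length_enumerate]; omega
      have hqo : q < ord.length := by omega
      have hb := hordmem _ (List.getElem_mem hqo)
      refine ⟨q, hq, r, hr0, ?_, ?_⟩
      · rw [PySem.List.getElem_enumerate]
        dsimp only
        rwa [show (0 : Int) + (q : Int) = (q : Int) by ring]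
      · rw [PySem.List.getElem_enumerate]
        dsimp only
        rw [htake q (le_of_lt hq')]
        have e1 : ((PySem.List.pyRange 0 (q : Int)).map HfI).sum = SSf q := rfl
        rw [e1, htgt]
        dsimp only
        rw [List.getD_eq_getElem ord 0 hqo, hlbval _ hb.1 hb.2]
        simp only [Prod.mk.injEq]
        exact ⟨trivial, by ring⟩
  have hRMmem : ∀ w : Int × Int, w ∈ RM ↔ ∃ (q : Nat), q < key.length ∧ ∃ (r : Int),
      0 ≤ r ∧ r < HfI (q : Int) ∧
      w = ((if r < rows then r * N + ord.getD q 0 else rows * N + lbF (ord.getD q 0)),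
        SSf q + r) := by
    intro w
    rw [hRM]
    simp only [List.mem_flatMap, List.mem_map, List.mem_filter, PySem.List.mem_pyRange_one,
      decide_eq_true_eq]
    constructor
    · rintro ⟨i, ⟨hi0, hi1⟩, c, ⟨⟨hc0, hcN⟩, hguard⟩, rfl⟩
      obtain ⟨hlt, hg⟩ := hRidx c hc0 hcN
      refine ⟨List.idxOf c ord, by omega, i, hi0, hguard, ?_⟩
      have hgd : ord.getD (List.idxOf c ord) 0 = c := by
        rw [List.getD_eq_getElem ord 0 hlt, hg]
      rw [hgd]
    · rintro ⟨q, hq', r, hr0, hrH, rfl⟩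
      have hqo : q < ord.length := by omega
      have hb := hordmem _ (List.getElem_mem hqo)
      have hcq : ord.getD q 0 = ord[q]'hqo := List.getD_eq_getElem ord 0 hqo
      have hidx : List.idxOf (ord[q]'hqo) ord = q := hordnd.idxOf_getElem q hqo
      refine ⟨r, ⟨hr0, by have := hHfle ((q : Nat) : Int); omega⟩, ord[q]'hqo,
        ⟨⟨hb.1, hb.2⟩, by rw [hidx]; exact hrH⟩, ?_⟩
      rw [hcq, hidx]
  have hWBnd : WB.Nodup := by
    have hsnd : WB.map Prod.snd = PySem.List.pyRange 0 ((s.length : Int)) := by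
      rw [hWB, pv_map_snd_pvW _ _ _ _ (fun p _ => hHf0 p.1)]
      have hsum2 : ((PySem.List.enumerate ord 0).map (fun p => HfI p.1)).sum
          = (s.length : Int) := by
        rw [show (PySem.List.enumerate ord 0).map (fun p => HfI p.1)
            = ((PySem.List.enumerate ord 0).take
                (PySem.List.enumerate ord 0).length).map (fun p => HfI p.1) by
              rw [List.take_length],
          show (PySem.List.enumerate ord 0).length = key.length by
            rw [PySem.List.length_enumerate]; omega,
          htake key.length (le_refl _), ← hNdef, hHfI,
          pv_sum_heights N rows extra hext0 (le_of_lt hextN)]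
        linarith [hLen]
      rw [hsum2]
      norm_num
    exact List.Nodup.of_map Prod.snd (by rw [hsnd]; exact PySem.List.nodup_pyRange_one ..)
  have hTKidx : ∀ (c : Int), (h0 : 0 ≤ c) → (hcN : c < N) →
      (c ∈ TK ↔ ((List.idxOf c ord : Nat) : Int) < extra) := by
    intro c h0 hcN
    have hmem : c ∈ ord := hordperm.mem_iff.mpr (PySem.List.mem_pyRange_one.mpr ⟨h0, hcN⟩)
    rw [hTK, pv_mem_take_iff hordnd extra.toNat c hmem]
    omega
  have hguardiff : ∀ (c : Int), (h0 : 0 ≤ c) → (hcN : c < N) →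
      (rows < HfI ((List.idxOf c ord : Nat) : Int) ↔ c ∈ TK) := by
    intro c h0 hcN
    rw [hTKidx c h0 hcN, hHfI]
    dsimp only
    by_cases hm : ((List.idxOf c ord : Nat) : Int) < extra
    · rw [if_pos hm]
      constructor <;> intro <;> omega
    · rw [if_neg hm]
      constructor <;> intro <;> omega
  set LL := (PySem.List.pyRange 0 N).filter (fun x => decide (x ∈ TK)) with hLL
  have hLLnd : LL.Nodup := (PySem.List.nodup_pyRange_one 0 N).filter _
  have hLLlen : LL.length = extra.toNat := by
    rw [hLL, pv_filter_nodup_length (PySem.List.nodup_pyRange_one 0 N) hTKnd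
      (fun x hx => PySem.List.mem_pyRange_one.mpr ⟨(hTKmem x hx).1, (hTKmem x hx).2⟩)]
    rw [hTK, List.length_take]
    omega
  have hLLval : ∀ (j : Nat) (hj : j < LL.length),
      (((PySem.List.pyRange 0 (LL[j]'hj)).countP (fun x => decide (x ∈ TK))) : Int) = j := by
    intro j hj
    have hcmem : LL[j]'hj ∈ LL := List.getElem_mem hj
    have hcf := List.mem_filter.mp hcmem
    obtain ⟨hc0, hcN⟩ := PySem.List.mem_pyRange_one.mp hcf.1
    have hcTK : LL[j]'hj ∈ TK := by simpa using hcf.2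
    have hsplit : PySem.List.pyRange 0 N
        = PySem.List.pyRange 0 (LL[j]'hj) ++ PySem.List.pyRange (LL[j]'hj) N :=
      PySem.List.pyRange_one_append 0 _ N hc0 (le_of_lt hcN)
    have hF2 : (PySem.List.pyRange (LL[j]'hj) N).filter (fun x => decide (x ∈ TK))
        = (LL[j]'hj) :: (PySem.List.pyRange ((LL[j]'hj) + 1) N).filter
            (fun x => decide (x ∈ TK)) := by
      rw [PySem.List.pyRange_one_cons hcN, List.filter_cons, if_pos (by simpa using hcTK)]
    have hLLsplit : LL = (PySem.List.pyRange 0 (LL[j]'hj)).filter (fun x => decide (x ∈ TK))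
        ++ (PySem.List.pyRange (LL[j]'hj) N).filter (fun x => decide (x ∈ TK)) := by
      conv_lhs => rw [hLL, hsplit]
      rw [List.filter_append]
    set F1 := (PySem.List.pyRange 0 (LL[j]'hj)).filter (fun x => decide (x ∈ TK)) with hF1
    have hlen1 : F1.length < LL.length := by
      conv_rhs => rw [hLLsplit]
      rw [List.length_append, hF2]
      simp
    have hgetF : LL[F1.length]'hlen1 = LL[j]'hj := by
      have h1 : LL[F1.length]? = some (LL[j]'hj) := by
        conv_lhs => rw [hLLsplit]
        rw [List.getElem?_append_right (le_refl F1.length), Nat.sub_self, hF2]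
        simp
      have h2 : LL[F1.length]? = some (LL[F1.length]'hlen1) := List.getElem?_eq_getElem hlen1
      rw [h1] at h2
      exact (Option.some_injective _ h2).symm
    have hFj : F1.length = j := by
      exact (hLLnd.getElem_inj_iff (hi := hlen1) (hj := hj)).mp hgetF
    rw [List.countP_eq_length_filter, ← hF1, hFj]
  have hLLmap : LL.map (fun c => rows * N + lbF c)
      = PySem.List.pyRange (rows * N) (rows * N + extra) := by
    apply List.ext_getElem
    · rw [List.length_map, hLLlen, PySem.List.length_pyRange_one]
      omega
    · intro j h1 h2
      simp only [List.getElem_map, PySem.List.getElem_pyRange_one]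
      have hj' : j < LL.length := by simpa using h1
      have e : lbF (LL[j]'hj') = (j : Int) := hLLval j hj'
      rw [e]
  have hRMfst : RM.map Prod.fst = PySem.List.pyRange 0 ((s.length : Int)) := by
    rw [hRM, List.map_flatMap]
    have hbody : ∀ i ∈ PySem.List.pyRange 0 (rows + 1),
        (((PySem.List.pyRange 0 N).filter
            (fun c => decide (i < HfI ((List.idxOf c ord : Nat) : Int)))).map
          (fun c => ((if i < rows then i * N + c else rows * N + lbF c),
            SSf (List.idxOf c ord) + i))).map Prod.fst
        = (if i < rows then PySem.List.pyRange (i * N) (i * N + N)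
           else PySem.List.pyRange (rows * N) (rows * N + extra)) := by
      intro i hi
      obtain ⟨hi0, hi1⟩ := PySem.List.mem_pyRange_one.mp hi
      rw [List.map_map]
      by_cases hir : i < rows
      · rw [if_pos hir]
        have hfe : (PySem.List.pyRange 0 N).filter
            (fun c => decide (i < HfI ((List.idxOf c ord : Nat) : Int)))
            = PySem.List.pyRange 0 N := by
          rw [List.filter_eq_self]
          intro c _
          have := hHfge ((List.idxOf c ord : Nat) : Int)
          simp only [decide_eq_true_eq]
          omega
        rw [hfe]
        have hcomp : (Prod.fst ∘ fun c => ((if i < rows then i * N + c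
            else rows * N + lbF c), SSf (List.idxOf c ord) + i))
            = fun c => i * N + c := by
          funext c
          simp [hir]
        rw [hcomp, pv_shift_pyRange]
      · rw [if_neg hir]
        have hieq : i = rows := by omega
        rw [hieq]
        have hfe : (PySem.List.pyRange 0 N).filter
            (fun c => decide (rows < HfI ((List.idxOf c ord : Nat) : Int))) = LL := by
          rw [hLL]
          apply List.filter_congr
          intro c hc
          obtain ⟨hc0, hcN⟩ := PySem.List.mem_pyRange_one.mp hc
          simp only [decide_eq_decide]
          exact hguardiff c hc0 hcN
        have hcomp : (Prod.fst ∘ fun c => ((if rows < rows then rows * N + c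
            else rows * N + lbF c), SSf (List.idxOf c ord) + rows))
            = fun c => rows * N + lbF c := by
          funext c
          simp
        rw [hfe, hcomp, hLLmap]
    rw [List.flatMap_def, List.map_congr_left hbody, ← List.flatMap_def]
    rw [PySem.List.pyRange_one_succ_right hrows0, List.flatMap_append]
    have hfirst : (PySem.List.pyRange 0 rows).flatMap
        (fun i => if i < rows then PySem.List.pyRange (i * N) (i * N + N)
          else PySem.List.pyRange (rows * N) (rows * N + extra))
        = PySem.List.pyRange 0 (rows * N) := by
      rw [show (PySem.List.pyRange 0 rows).flatMap
          (fun i => if i < rows then PySem.List.pyRange (i * N) (i * N + N)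
            else PySem.List.pyRange (rows * N) (rows * N + extra))
          = (PySem.List.pyRange 0 rows).flatMap
            (fun i => PySem.List.pyRange (i * N) (i * N + N)) from by
        rw [List.flatMap_def, List.flatMap_def]
        congr 1
        apply List.map_congr_left
        intro i hi
        rw [if_pos (PySem.List.mem_pyRange_one.mp hi).2]]
      rw [show rows = ((rows.toNat : Nat) : Int) by omega]
      exact pv_blocks N rows.toNat (by omega)
    rw [hfirst]
    simp only [List.flatMap_cons, List.flatMap_nil, List.append_nil]
    rw [if_neg (lt_irrefl rows)]
    rw [← PySem.List.pyRange_one_append 0 (rows * N) (rows * N + extra)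
      (by positivity) (by omega), hLen]
  have hRMnd : RM.Nodup :=
    List.Nodup.of_map Prod.fst (by rw [hRMfst]; exact PySem.List.nodup_pyRange_one ..)
  have hPerm : WB.Perm RM := by
    rw [List.perm_ext_iff_of_nodup hWBnd hRMnd]
    intro w
    rw [hWBmem, hRMmem]
  -- ===== the two folds agree (distinct targets commute) =====
  have hWB0 : ∀ w ∈ WB, 0 ≤ w.1 := by
    intro w hw
    obtain ⟨q, hq, r, hr0, hrH, rfl⟩ := (hWBmem w).mp hw
    dsimp only
    have hc' : 0 ≤ ord.getD q 0 ∧ ord.getD q 0 < N := by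
      refine hordmem (ord.getD q 0) ?_
      rw [List.getD_eq_getElem ord 0 (by omega)]
      exact List.getElem_mem _
    have hlf := hlbF0 (ord.getD q 0)
    split_ifs with h
    · nlinarith [hc'.1]
    · nlinarith [hlf]
  have hfold : WB.foldl (pvWrite s) (List.replicate s.length ([] : List Char))
      = RM.foldl (pvWrite s) (List.replicate s.length ([] : List Char)) := by
    refine hPerm.foldl_eq' ?_ _
    intro x hx y hy z
    by_cases hxy : x = y
    · rw [hxy]
    · have hfst : x.1 ≠ y.1 := by
        intro hc
        have hnd : (WB.map Prod.fst).Nodup := by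
          rw [(hPerm.map Prod.fst).nodup_iff, hRMfst]
          exact PySem.List.nodup_pyRange_one ..
        exact hxy (List.inj_on_of_nodup_map hnd hx hy hc)
      have hx0 := hWB0 x hx
      have hy0 := hWB0 y hy
      unfold pvWrite
      rw [PySem.List.pySetD_of_nonneg _ _ hx0, PySem.List.pySetD_of_nonneg _ _ hy0,
        PySem.List.pySetD_of_nonneg _ _ hy0, PySem.List.pySetD_of_nonneg _ _ hx0,
        List.set_comm _ _ (by omega)]
  -- ===== assemble B's output row-major =====
  have hRMlen : RM.length = s.length := by
    have := congrArg List.length hRMfst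
    rw [List.length_map, PySem.List.length_pyRange_one] at this
    omega
  have hasm : RM.foldl (pvWrite s) (List.replicate s.length ([] : List Char))
      = RM.map (fun w => [PySem.List.pyGetD s w.2 ' ']) := by
    rw [pv_assemble s RM (List.replicate s.length ([] : List Char)) 0
      (by rw [hRMfst]; norm_num [hRMlen])
      (by simp [hRMlen])]
    simp [hRMlen]
  rw [hfold, hasm, show RM.map (fun w => [PySem.List.pyGetD s w.2 ' '])
      = (RM.map (fun w => PySem.List.pyGetD s w.2 ' ')).map (fun x => [x]) from by
    rw [List.map_map]; rfl, pv_flatten_singleton]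
  apply congrArg String.ofList
  -- ===== A's readout as a row-major flatMap =====
  have hinner : (fun (acc : List Char) (i : Int) => (PySem.List.pyRange 0 N).foldl
      (fun acc c => if i < ((PySem.List.pyGetD tA.1 c []).length : Int)
        then acc ++ [PySem.List.pyGetD (PySem.List.pyGetD tA.1 c []) i ' '] else acc) acc)
      = fun acc i => acc ++ ((PySem.List.pyRange 0 N).filter
          (fun c => decide (i < ((PySem.List.pyGetD tA.1 c []).length : Int)))).map
        (fun c => PySem.List.pyGetD (PySem.List.pyGetD tA.1 c []) i ' ') := by
    funext acc i
    exact PySem.List.foldl_append_ite _ _ _ _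
  rw [hinner, PySem.List.foldl_append_eq_flatMap, List.nil_append]
  rw [hRM, List.map_flatMap]
  rw [List.flatMap_def, List.flatMap_def]
  apply congrArg List.flatten
  apply List.map_congr_left
  intro i hi
  obtain ⟨hi0, hi1⟩ := PySem.List.mem_pyRange_one.mp hi
  rw [List.map_map]
  have hfe : (PySem.List.pyRange 0 N).filter
      (fun c => decide (i < ((PySem.List.pyGetD tA.1 c []).length : Int)))
      = (PySem.List.pyRange 0 N).filter
        (fun c => decide (i < HfI ((List.idxOf c ord : Nat) : Int))) := by
    apply List.filter_congr
    intro c hc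
    obtain ⟨hc0, hcN⟩ := PySem.List.mem_pyRange_one.mp hc
    simp only [decide_eq_decide]
    rw [hcollen c hc0 hcN]
  rw [hfe]
  apply List.map_congr_left
  intro c hcmem
  have hcf := List.mem_filter.mp hcmem
  obtain ⟨hc0, hcN⟩ := PySem.List.mem_pyRange_one.mp hcf.1
  have hguard : i < HfI ((List.idxOf c ord : Nat) : Int) := by simpa using hcf.2
  simp only [Function.comp]
  rw [hcol c hc0 hcN]
  have hm1 := hSSnn (List.idxOf c ord)
  have hm2 := hHf0 ((List.idxOf c ord : Nat) : Int)
  have hm3 : SSf (List.idxOf c ord) + HfI ((List.idxOf c ord : Nat) : Int) ≤ (s.length : Int) :=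
    hSSb (List.idxOf c ord) (by have := (hRidx c hc0 hcN).1; omega)
  have hidx : (SSf (List.idxOf c ord)).toNat + i.toNat < s.length := by omega
  have hL : PySem.List.pyGetD ((s.drop (SSf (List.idxOf c ord)).toNat).take
      (HfI ((List.idxOf c ord : Nat) : Int)).toNat) i ' '
      = s[(SSf (List.idxOf c ord)).toNat + i.toNat]'hidx := by
    rw [PySem.List.pyGetD_eq_getElem _ _ hi0 (by
      rw [List.length_take, List.length_drop]
      omega)]
    rw [List.getElem_take, List.getElem_drop]
  have hR : PySem.List.pyGetD s (SSf (List.idxOf c ord) + i) ' '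
      = s[(SSf (List.idxOf c ord)).toNat + i.toNat]'hidx := by
    rw [PySem.List.pyGetD_eq_getElem s ' ' (by omega) (by omega)]
    congr 1
    omega
  rw [hL, hR]

-- ===== VERDICT (by name: the statement is the Claim_ definition above) =====
theorem amsco_decode_spec : Claim_equal_amsco_decode := by
  intro cipher key _ hpre
  unfold Spec_amsco_decode
  exact pv_main cipher key hpre
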